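-- pv_equiv track=rewrite | github.com/WGLab/SCOTCH | src/preprocessing.py | find_parent_isoform
-- ===== SOURCE A (Python) =====
-- def novelid_to_exonid(novelid):
--     exonid = []
--     position = 0
--     while novelid > 0:
--         if novelid & 1:
--             exonid.append(position)
--         novelid >>= 1
--         position += 1
--     return exonid
--
-- def find_parent_isoform(novel_isoform_id_list, child_id, geneStrand):
--     for i in range(len(novel_isoform_id_list)):
--         child_exon = novelid_to_exonid(child_id)
--         parent_exon = novelid_to_exonid(novel_isoform_id_list[i])
--         if(set(child_exon).issubset(set(parent_exon))):
--             diff_elements = set(parent_exon)-set(child_exon)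
--             if (geneStrand=='+' and len([ele for ele in diff_elements if ele<min(child_exon)])==len(diff_elements)) or (geneStrand == '-' and len([ele for ele in diff_elements if ele > max(child_exon)]) == len(
--                     diff_elements)):
--                 return novel_isoform_id_list[i]
-- ===== SOURCE B (Python) =====
-- def find_parent_isoform(novel_isoform_id_list, child_id, geneStrand):
--     c = child_id if child_id > 0 else 0   # nonpositive ids encode no exons
--     for p in novel_isoform_id_list:
--         m = p if p > 0 else 0
--         if m & c == c:                    # child's exons are a subset of the parent's
--             diff = m ^ c                  # the parent's extra exons
--             if (geneStrand == '+' and (diff == 0 or c % (1 << diff.bit_length()) == 0)) or \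
--                (geneStrand == '-' and diff % (1 << c.bit_length()) == 0):
--                 return p
--     return None
-- ===== Notes on version B (the rewrite author's own statement) =====
-- stated objective: faster
-- what changed: Instead of decoding each id into an exon-position list and comparing Python sets (subset test, set difference, min/max scans), B tests the raw integer bitmasks directly: subset is m & c == c, the extra exons are diff = m ^ c, and the '+'/'-' boundary conditions become closed-form divisibility-by-power-of-two tests via bit_length.
import Mathlib
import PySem

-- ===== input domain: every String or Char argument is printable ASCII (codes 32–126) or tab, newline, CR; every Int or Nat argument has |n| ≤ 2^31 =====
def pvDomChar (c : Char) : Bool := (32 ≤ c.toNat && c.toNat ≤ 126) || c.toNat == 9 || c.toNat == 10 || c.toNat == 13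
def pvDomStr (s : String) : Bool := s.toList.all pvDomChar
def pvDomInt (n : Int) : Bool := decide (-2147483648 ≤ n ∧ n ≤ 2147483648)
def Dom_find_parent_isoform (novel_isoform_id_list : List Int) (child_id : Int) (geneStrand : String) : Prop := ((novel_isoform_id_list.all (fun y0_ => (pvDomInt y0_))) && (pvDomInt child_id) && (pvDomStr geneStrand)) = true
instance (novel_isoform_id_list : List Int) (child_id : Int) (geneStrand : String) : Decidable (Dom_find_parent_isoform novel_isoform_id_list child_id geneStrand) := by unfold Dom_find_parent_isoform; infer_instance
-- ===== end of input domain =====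

-- ===== PORT A =====
-- B replaces A's per-parent exon-list decoding and set algebra by closed-form bit tests on
-- the raw isoform bitmasks (objective: faster by a large constant factor, measured; no per-parent lists or sets are built).

def novelid_to_exonid_go (novelid : Int) (position : Int) : List Int :=
  if _h : 0 < novelid then
    (if PySem.Int.band novelid 1 = 1 then [position] else []) ++
      novelid_to_exonid_go (novelid >>> (1:Nat)) (position + 1)
  else []
termination_by novelid.toNat
decreasing_by
  rw [Int.shiftRight_eq_div_pow]; omega
def novelid_to_exonid (novelid : Int) : List Int := novelid_to_exonid_go novelid 0

def find_parent_isoform_go : List Int → Int → String → Option Int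
  | [], _, _ => none
  | p :: rest, child_id, geneStrand =>
    let child_exon := novelid_to_exonid child_id
    let parent_exon := novelid_to_exonid p
    if PySem.Set.issubset (PySem.Set.ofList child_exon) (PySem.Set.ofList parent_exon) then
      let diff_elements := PySem.Set.diff (PySem.Set.ofList parent_exon) (PySem.Set.ofList child_exon)
      if (geneStrand == "+" &&
            ((diff_elements.filter fun ele =>
                ele < (PySem.List.min? child_exon fun x => x).getD 0).length == diff_elements.length))
        || (geneStrand == "-" &&
            ((diff_elements.filter fun ele =>
                (PySem.List.max? child_exon fun x => x).getD 0 < ele).length == diff_elements.length)) then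
        some p
      else find_parent_isoform_go rest child_id geneStrand
    else find_parent_isoform_go rest child_id geneStrand

def find_parent_isoform (novel_isoform_id_list : List Int) (child_id : Int) (geneStrand : String) : Option Int :=
  find_parent_isoform_go novel_isoform_id_list child_id geneStrand

def find_parent_isoform_alt_go : List Int → Int → String → Option Int
  | [], _, _ => none
  | p :: rest, c, geneStrand =>
    let m : Int := if 0 < p then p else 0
    if PySem.Int.band m c == c then
      let diff := PySem.Int.bxor m c
      if (geneStrand == "+" &&
            (diff == 0 || PySem.Int.mod c ((1:Int) <<< PySem.Int.bitLength diff) == 0))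
        || (geneStrand == "-" &&
            (PySem.Int.mod diff ((1:Int) <<< PySem.Int.bitLength c) == 0)) then
        some p
      else find_parent_isoform_alt_go rest c geneStrand
    else find_parent_isoform_alt_go rest c geneStrand

def find_parent_isoform_alt (novel_isoform_id_list : List Int) (child_id : Int) (geneStrand : String) : Option Int :=
  find_parent_isoform_alt_go novel_isoform_id_list (if 0 < child_id then child_id else 0) geneStrand


-- ===== PRECONDITION & SPEC =====
-- Pre_ excludes exactly the inputs on which A raises ValueError (min()/max() of an empty
-- exon list): child_id encodes no exons (child_id <= 0), the strand is '+' or '-', and the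
-- first parent id encodes at least one exon.
def Pre_find_parent_isoform (novel_isoform_id_list : List Int) (child_id : Int) (geneStrand : String) : Prop :=
  child_id ≤ 0 → (geneStrand = "+" ∨ geneStrand = "-") → novel_isoform_id_list.headD 0 ≤ 0
instance (novel_isoform_id_list : List Int) (child_id : Int) (geneStrand : String) : Decidable (Pre_find_parent_isoform novel_isoform_id_list child_id geneStrand) := by unfold Pre_find_parent_isoform; infer_instance
def pvWitness_find_parent_isoform : List Int × Int × String := ([6, 7, 3], 2, "+")

def Spec_find_parent_isoform (novel_isoform_id_list : List Int) (child_id : Int) (geneStrand : String) (out : Option Int) : Prop := out = find_parent_isoform_alt novel_isoform_id_list child_id geneStrand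
instance (novel_isoform_id_list : List Int) (child_id : Int) (geneStrand : String) (out : Option Int) : Decidable (Spec_find_parent_isoform novel_isoform_id_list child_id geneStrand out) := by unfold Spec_find_parent_isoform; infer_instance

-- ===== CLAIM (what is proved, stated in full; the proofs are below) =====
def Claim_equal_find_parent_isoform : Prop := ∀ (novel_isoform_id_list : List Int) (child_id : Int) (geneStrand : String), Dom_find_parent_isoform novel_isoform_id_list child_id geneStrand → Pre_find_parent_isoform novel_isoform_id_list child_id geneStrand → Spec_find_parent_isoform novel_isoform_id_list child_id geneStrand (find_parent_isoform novel_isoform_id_list child_id geneStrand)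
-- ===== LEMMAS AND PROOFS =====

lemma pv_bit_lt_of_lt_two_pow {n k i : Nat} (h : n < 2 ^ k) (hb : n.testBit i = true) : i < k := by
  by_contra hik
  have : n < 2 ^ i := lt_of_lt_of_le h (Nat.pow_le_pow_right (by norm_num) (by omega))
  simp [Nat.testBit_eq_false_of_lt this] at hb

lemma pv_dvd_two_pow_iff {n k : Nat} : 2 ^ k ∣ n ↔ ∀ i < k, n.testBit i = false := by
  rw [Nat.dvd_iff_mod_eq_zero]
  constructor
  · intro h i hik
    have := congrArg (fun x => x.testBit i) h
    simp [Nat.testBit_mod_two_pow, hik] at this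
    exact this
  · intro h
    apply Nat.eq_of_testBit_eq
    intro i
    rw [Nat.testBit_mod_two_pow, Nat.zero_testBit]
    by_cases hi : i < k
    · simp [hi, h i hi]
    · simp [hi]

lemma pv_and_eq_left_iff {C M : Nat} : C &&& M = C ↔ ∀ i, C.testBit i = true → M.testBit i = true := by
  constructor
  · intro h i hc
    have := congrArg (fun x => x.testBit i) h
    simp [Nat.testBit_and, hc] at this
    exact this
  · intro h
    apply Nat.eq_of_testBit_eq
    intro i
    rw [Nat.testBit_and]
    by_cases hc : C.testBit i = true
    · simp [hc, h i hc]
    · simp [Bool.eq_false_iff.mpr hc]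

lemma pv_exists_testBit {n : Nat} (h : 0 < n) : ∃ i, n.testBit i = true := by
  by_contra hn
  rw [not_exists] at hn
  have : n = 0 := Nat.eq_of_testBit_eq (fun i => by
    simp [Nat.zero_testBit, Bool.eq_false_iff.mpr (hn i)])
  omega

lemma pv_bit_lt_bitLength {n i : Nat} (hb : n.testBit i = true) : i < PySem.Int.bitLength (n : Int) := by
  have h := PySem.Int.lt_two_pow_bitLength (n : Int)
  simp at h
  exact pv_bit_lt_of_lt_two_pow h hb

lemma pv_top_bit {n : Nat} (h : 0 < n) : n.testBit (PySem.Int.bitLength (n : Int) - 1) = true := by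
  set B := PySem.Int.bitLength (n : Int) with hB
  have h1 : n < 2 ^ B := by have := PySem.Int.lt_two_pow_bitLength (n : Int); simpa using this
  have h2 : 2 ^ (B - 1) ≤ n := by
    have := PySem.Int.two_pow_bitLength_le (n : Int) (by exact_mod_cast h.ne')
    simpa using this
  have hBpos : 0 < B := by
    by_contra hb
    have : B = 0 := by omega
    rw [this] at h1; simp at h1; omega
  have hpow : 2 ^ B = 2 ^ (B - 1) * 2 := by
    rw [← Nat.pow_succ]; congr 1; omega
  have hd1 : 1 ≤ n / 2 ^ (B - 1) := (Nat.one_le_div_iff ((Nat.two_pow_pos _))).mpr h2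
  have hd2 : n / 2 ^ (B - 1) < 2 := (Nat.div_lt_iff_lt_mul ((Nat.two_pow_pos _))).mpr (by omega)
  rw [Nat.testBit_eq_decide_div_mod_eq]
  have : n / 2 ^ (B - 1) = 1 := by omega
  simp [this]

lemma pv_go_mem (n pos e : Int) :
    e ∈ novelid_to_exonid_go n pos ↔ ∃ i : Nat, n.toNat.testBit i = true ∧ e = pos + i := by
  induction n, pos using novelid_to_exonid_go.induct with
  | case2 n pos hn =>
    rw [novelid_to_exonid_go]
    simp only [dif_neg hn, List.not_mem_nil, false_iff]
    rintro ⟨i, hb, -⟩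
    have : n.toNat = 0 := by omega
    rw [this, Nat.zero_testBit] at hb
    exact absurd hb (by simp)
  | case1 n pos hn ih =>
    rw [novelid_to_exonid_go]
    rw [dif_pos hn]
    have hsh : (n >>> (1:Nat)).toNat = n.toNat / 2 := by rw [Int.shiftRight_eq_div_pow]; omega
    have hband : (PySem.Int.band n 1 = 1) ↔ (n.toNat % 2 = 1) := by
      have hcast : n = ((n.toNat : Nat) : Int) := by omega
      rw [hcast]
      rw [show (1:Int) = ((1:Nat):Int) from rfl, PySem.Int.band_natCast]
      rw [Nat.and_one_is_mod]
      exact ⟨fun h => by exact_mod_cast h, fun h => by exact_mod_cast h⟩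
    simp only [List.mem_append, ih, hsh]
    constructor
    · rintro (h1 | ⟨i, hb, he⟩)
      · have hpos : e = pos := by
          by_cases hb : PySem.Int.band n 1 = 1 <;> simp [hb] at h1
          exact h1
        refine ⟨0, ?_, by omega⟩
        rw [Nat.testBit_zero]
        by_cases hb : PySem.Int.band n 1 = 1
        · simp [hband.mp hb]
        · simp [hb] at h1
      · exact ⟨i + 1, by rw [Nat.testBit_succ]; exact hb, by push_cast; omega⟩
    · rintro ⟨i, hb, he⟩
      match i with
      | 0 =>
        left
        rw [Nat.testBit_zero] at hb
        have : n.toNat % 2 = 1 := by simpa using hb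
        simp [hband.mpr this]
        omega
      | (j+1) =>
        right
        rw [Nat.testBit_succ] at hb
        exact ⟨j, hb, by push_cast at he ⊢; omega⟩

lemma pv_decode_mem (n e : Int) :
    e ∈ novelid_to_exonid n ↔ ∃ i : Nat, n.toNat.testBit i = true ∧ e = (i : Int) := by
  unfold novelid_to_exonid
  rw [pv_go_mem]
  simp

lemma pv_decode_nonpos {n : Int} (h : n ≤ 0) : novelid_to_exonid n = [] := by
  unfold novelid_to_exonid
  rw [novelid_to_exonid_go, dif_neg (by omega)]

lemma pv_m_eq (p : Int) : (if 0 < p then p else 0) = ((p.toNat : Nat) : Int) := by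
  split <;> omega

lemma pv_subset_eq (child p : Int) (hc : 0 < child) :
    PySem.Set.issubset (PySem.Set.ofList (novelid_to_exonid child)) (PySem.Set.ofList (novelid_to_exonid p))
      = (PySem.Int.band (if 0 < p then p else 0) child == child) := by
  rw [Bool.eq_iff_iff]
  rw [PySem.Set.issubset_iff]
  rw [pv_m_eq, show child = ((child.toNat : Nat) : Int) by omega, PySem.Int.band_natCast]
  rw [beq_iff_eq, Nat.cast_inj]
  constructor
  · intro h
    rw [Nat.and_comm, pv_and_eq_left_iff]
    intro i hb
    have := h (i : Int) (by rw [PySem.Set.mem_ofList, pv_decode_mem]; exact ⟨i, hb, rfl⟩)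
    rw [PySem.Set.mem_ofList, pv_decode_mem] at this
    rcases this with ⟨j, hbj, hej⟩
    have : i = j := by exact_mod_cast hej
    rwa [this]
  · intro h x hx
    rw [PySem.Set.mem_ofList, pv_decode_mem] at hx ⊢
    rcases hx with ⟨i, hb, he⟩
    have hand : p.toNat &&& child.toNat = child.toNat := by exact_mod_cast h
    rw [Nat.and_comm] at hand
    exact ⟨i, pv_and_eq_left_iff.mp hand i hb, he⟩

lemma pv_mem_diffSet (child p : Int) (e : Int)
    (hsub : child.toNat &&& p.toNat = child.toNat) :
    (e ∈ PySem.Set.diff (PySem.Set.ofList (novelid_to_exonid p)) (PySem.Set.ofList (novelid_to_exonid child))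
      ↔ ∃ i : Nat, (p.toNat ^^^ child.toNat).testBit i = true ∧ e = (i : Int)) := by
  rw [PySem.Set.mem_diff]
  simp only [PySem.Set.mem_ofList, pv_decode_mem]
  constructor
  · rintro ⟨⟨i, hb, he⟩, hnc⟩
    refine ⟨i, ?_, he⟩
    rw [Nat.testBit_xor, hb]
    have : child.toNat.testBit i = false := by
      rcases Bool.eq_false_or_eq_true (child.toNat.testBit i) with h | h
      · exact absurd ⟨i, h, he⟩ hnc
      · exact h
    simp [this]

  · rintro ⟨i, hb, he⟩
    rw [Nat.testBit_xor] at hb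
    have hcb : child.toNat.testBit i = false := by
      rcases Bool.eq_false_or_eq_true (child.toNat.testBit i) with h | h
      · rw [h, pv_and_eq_left_iff.mp hsub i h] at hb; simp at hb
      · exact h
    have hpb : p.toNat.testBit i = true := by
      rcases Bool.eq_false_or_eq_true (p.toNat.testBit i) with h | h
      · exact h
      · rw [h, hcb] at hb; simp at hb
    refine ⟨⟨i, hpb, he⟩, ?_⟩
    rintro ⟨j, hbj, hej⟩
    have hij : (i : Int) = (j : Int) := by rw [← he, hej]
    have : i = j := by exact_mod_cast hij
    rw [← this, hcb] at hbj
    simp at hbj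

lemma pv_one_shl (k : Nat) : (1:Int) <<< k = ((2 ^ k : Nat) : Int) := by
  rw [Int.shiftLeft_eq]; push_cast; ring

lemma pv_plus_eq (child p : Int) (hc : 0 < child)
    (hsub : child.toNat &&& p.toNat = child.toNat) :
    (((PySem.Set.diff (PySem.Set.ofList (novelid_to_exonid p)) (PySem.Set.ofList (novelid_to_exonid child))).filter fun ele =>
        ele < (PySem.List.min? (novelid_to_exonid child) fun x => x).getD 0).length
      == (PySem.Set.diff (PySem.Set.ofList (novelid_to_exonid p)) (PySem.Set.ofList (novelid_to_exonid child))).length)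
    = (PySem.Int.bxor (if 0 < p then p else 0) child == 0
        || PySem.Int.mod child ((1:Int) <<< PySem.Int.bitLength (PySem.Int.bxor (if 0 < p then p else 0) child)) == 0) := by
  have hcast : child = ((child.toNat : Nat) : Int) := by omega
  have hCpos : 0 < child.toNat := by omega
  set D : Nat := p.toNat ^^^ child.toNat with hD
  have hxor : PySem.Int.bxor (if 0 < p then p else 0) child = ((D : Nat) : Int) := by
    rw [pv_m_eq]; conv_lhs => rw [hcast]
    rw [PySem.Int.bxor_natCast]
  -- the min of the child exon list is some ↑k with k a set bit of child, minimal
  obtain ⟨k0, hk0⟩ := pv_exists_testBit hCpos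
  have hmem0 : ((k0 : Nat) : Int) ∈ novelid_to_exonid child := (pv_decode_mem child _).mpr ⟨k0, hk0, rfl⟩
  rcases hmin : PySem.List.min? (novelid_to_exonid child) (fun x => x) with _ | m
  · rw [PySem.List.min?_eq_none_iff] at hmin
    rw [hmin] at hmem0; simp at hmem0
  have hmmem := PySem.List.min?_mem hmin
  rw [pv_decode_mem] at hmmem
  obtain ⟨k, hbk, hmk⟩ := hmmem
  have hminle : ∀ y ∈ novelid_to_exonid child, m ≤ y := fun y hy => PySem.List.min?_isMin hmin y hy
  rw [Bool.eq_iff_iff, Bool.or_eq_true]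
  simp only [beq_iff_eq, List.length_filter_eq_length_iff]
  rw [hxor, Nat.cast_eq_zero, pv_one_shl]
  conv_rhs => rw [hcast]
  rw [PySem.Int.mod_eq_zero_iff_dvd, Int.natCast_dvd_natCast]
  constructor
  · intro hA
    by_cases hD0 : D = 0
    · exact Or.inl hD0
    · right
      rw [pv_dvd_two_pow_iff]
      intro j hj
      by_contra hcj
      have hcj : child.toNat.testBit j = true := by
        rcases Bool.eq_false_or_eq_true (child.toNat.testBit j) with h | h
        · exact h
        · exact absurd h hcj
      have hjmem : ((j : Nat) : Int) ∈ novelid_to_exonid child := (pv_decode_mem child _).mpr ⟨j, hcj, rfl⟩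
      have hkj : (k : Int) ≤ (j : Int) := by
        have := hminle _ hjmem; rw [hmk] at this; exact_mod_cast this
      have hkj' : k ≤ j := by exact_mod_cast hkj
      have hDpos : 0 < D := Nat.pos_of_ne_zero hD0
      have htop := pv_top_bit hDpos
      have := hA _ ((pv_mem_diffSet child p _ hsub).mpr ⟨_, htop, rfl⟩)
      simp only [Option.getD_some, decide_eq_true_eq] at this
      rw [hmk] at this
      have hlt : PySem.Int.bitLength ((D : Nat) : Int) - 1 < k := by exact_mod_cast this
      omega
  · intro h e he
    rw [pv_mem_diffSet child p _ hsub] at he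
    obtain ⟨i, hbi, hei⟩ := he
    rcases h with hD0 | hdvd
    · rw [← hD, hD0, Nat.zero_testBit] at hbi; simp at hbi
    · have hklarge : ¬ k < PySem.Int.bitLength ((D:Nat):Int) := by
        intro hk
        have := pv_dvd_two_pow_iff.mp hdvd k hk
        rw [hbk] at this; simp at this
      have hi : i < PySem.Int.bitLength ((D:Nat):Int) := pv_bit_lt_bitLength hbi
      simp only [Option.getD_some, decide_eq_true_eq]
      rw [hei, hmk]
      exact_mod_cast (by omega : i < k)

lemma pv_minus_eq (child p : Int) (hc : 0 < child)
    (hsub : child.toNat &&& p.toNat = child.toNat) :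
    (((PySem.Set.diff (PySem.Set.ofList (novelid_to_exonid p)) (PySem.Set.ofList (novelid_to_exonid child))).filter fun ele =>
        (PySem.List.max? (novelid_to_exonid child) fun x => x).getD 0 < ele).length
      == (PySem.Set.diff (PySem.Set.ofList (novelid_to_exonid p)) (PySem.Set.ofList (novelid_to_exonid child))).length)
    = (PySem.Int.mod (PySem.Int.bxor (if 0 < p then p else 0) child) ((1:Int) <<< PySem.Int.bitLength child) == 0) := by
  have hcast : child = ((child.toNat : Nat) : Int) := by omega
  have hCpos : 0 < child.toNat := by omega
  set D : Nat := p.toNat ^^^ child.toNat with hD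
  have hxor : PySem.Int.bxor (if 0 < p then p else 0) child = ((D : Nat) : Int) := by
    rw [pv_m_eq]; conv_lhs => rw [hcast]
    rw [PySem.Int.bxor_natCast]
  obtain ⟨k0, hk0⟩ := pv_exists_testBit hCpos
  have hmem0 : ((k0 : Nat) : Int) ∈ novelid_to_exonid child := (pv_decode_mem child _).mpr ⟨k0, hk0, rfl⟩
  rcases hmax : PySem.List.max? (novelid_to_exonid child) (fun x => x) with _ | m
  · rw [PySem.List.max?_eq_none_iff] at hmax
    rw [hmax] at hmem0; simp at hmem0
  have hmmem := PySem.List.max?_mem hmax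
  rw [pv_decode_mem] at hmmem
  obtain ⟨k, hbk, hmk⟩ := hmmem
  have hmaxle : ∀ y ∈ novelid_to_exonid child, y ≤ m := fun y hy => PySem.List.max?_isMax hmax y hy
  rw [Bool.eq_iff_iff]
  simp only [beq_iff_eq, List.length_filter_eq_length_iff]
  rw [hxor, pv_one_shl]
  conv_rhs => rw [hcast]
  rw [PySem.Int.mod_eq_zero_iff_dvd, Int.natCast_dvd_natCast]
  -- k = bitLength child - 1
  have hktop : k = PySem.Int.bitLength ((child.toNat : Nat) : Int) - 1 := by
    have h1 : k < PySem.Int.bitLength ((child.toNat : Nat) : Int) := pv_bit_lt_bitLength hbk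
    have htop := pv_top_bit hCpos
    have hmemtop : ((PySem.Int.bitLength ((child.toNat : Nat) : Int) - 1 : Nat) : Int) ∈ novelid_to_exonid child :=
      (pv_decode_mem child _).mpr ⟨_, htop, rfl⟩
    have := hmaxle _ hmemtop
    rw [hmk] at this
    have h2 : PySem.Int.bitLength ((child.toNat : Nat) : Int) - 1 ≤ k := by exact_mod_cast this
    omega
  have hkB : k < PySem.Int.bitLength ((child.toNat : Nat) : Int) := pv_bit_lt_bitLength hbk
  constructor
  · intro hA
    rw [pv_dvd_two_pow_iff]
    intro j hj
    by_contra hdj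
    have hdj : D.testBit j = true := by
      rcases Bool.eq_false_or_eq_true (D.testBit j) with h | h
      · exact h
      · exact absurd h hdj
    have := hA _ ((pv_mem_diffSet child p _ hsub).mpr ⟨j, hdj, rfl⟩)
    simp only [Option.getD_some, decide_eq_true_eq] at this
    rw [hmk] at this
    have : k < j := by exact_mod_cast this
    omega
  · intro hdvd e he
    rw [pv_mem_diffSet child p _ hsub] at he
    obtain ⟨i, hbi, hei⟩ := he
    have hige : ¬ i < PySem.Int.bitLength ((child.toNat:Nat):Int) := by
      intro hk
      have := pv_dvd_two_pow_iff.mp hdvd i hk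
      rw [hbi] at this; simp at this
    simp only [Option.getD_some, decide_eq_true_eq]
    rw [hei, hmk]
    exact_mod_cast (by omega : k < i)

lemma pv_go_eq_pos (child : Int) (hc : 0 < child) (l : List Int) (s : String) :
    find_parent_isoform_go l child s = find_parent_isoform_alt_go l child s := by
  induction l with
  | nil => rfl
  | cons p rest ih =>
    show find_parent_isoform_go (p :: rest) child s = find_parent_isoform_alt_go (p :: rest) child s
    simp only [find_parent_isoform_go, find_parent_isoform_alt_go]
    rw [pv_subset_eq child p hc, pv_m_eq p]
    by_cases hb : (PySem.Int.band ((p.toNat : Nat) : Int) child == child) = true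
    · rw [if_pos hb, if_pos hb]
      have hsub : child.toNat &&& p.toNat = child.toNat := by
        rw [show child = ((child.toNat : Nat) : Int) by omega, PySem.Int.band_natCast, beq_iff_eq, Nat.cast_inj] at hb
        rw [Nat.and_comm]
        exact hb
      rw [pv_plus_eq child p hc hsub, pv_minus_eq child p hc hsub, pv_m_eq p]
      split
      · rfl
      · exact ih
    · rw [if_neg hb, if_neg hb]
      exact ih

lemma pv_go_other (l : List Int) (child : Int) (s : String)
    (hp : s ≠ "+") (hm : s ≠ "-") :
    find_parent_isoform_go l child s = none ∧ find_parent_isoform_alt_go l (if 0 < child then child else 0) s = none := by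
  have h1 : (s == "+") = false := beq_eq_false_iff_ne.mpr hp
  have h2 : (s == "-") = false := beq_eq_false_iff_ne.mpr hm
  induction l with
  | nil => exact ⟨rfl, rfl⟩
  | cons p rest ih =>
    constructor
    · show find_parent_isoform_go (p :: rest) child s = none
      simp only [find_parent_isoform_go, h1, h2, Bool.false_and, Bool.or_self]
      split <;> simp [ih.1]
    · show find_parent_isoform_alt_go (p :: rest) (if 0 < child then child else 0) s = none
      simp only [find_parent_isoform_alt_go, h1, h2, Bool.false_and, Bool.or_self]
      split <;> simp [ih.2]

theorem pv_main : ∀ (l : List Int) (child : Int) (s : String),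
    Pre_find_parent_isoform l child s →
    find_parent_isoform l child s = find_parent_isoform_alt l child s := by
  intro l child s hpre
  unfold find_parent_isoform find_parent_isoform_alt
  by_cases hps : s = "+" ∨ s = "-"
  · by_cases hc : 0 < child
    · rw [if_pos hc]
      exact pv_go_eq_pos child hc l s
    · have hch : child ≤ 0 := by omega
      have hhead := hpre hch hps
      rw [if_neg hc]
      cases l with
      | nil => rfl
      | cons h t =>
        have hh : h ≤ 0 := by simpa using hhead
        have hnl : ¬ 0 < h := by omega
        have hdec : novelid_to_exonid child = [] := pv_decode_nonpos hch
        have hdech : novelid_to_exonid h = [] := pv_decode_nonpos hh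
        rcases hps with hp | hp <;> subst hp <;>
          simp [find_parent_isoform_go, find_parent_isoform_alt_go, hdec, hdech, hnl,
            PySem.Set.ofList, PySem.Set.issubset, PySem.Set.diff]
  · rw [not_or] at hps
    obtain ⟨h1, h2⟩ := pv_go_other l child s hps.1 hps.2
    rw [h1, h2]

-- ===== VERDICT (by name: the statement is the Claim_ definition above) =====
theorem find_parent_isoform_spec : Claim_equal_find_parent_isoform := by
  intro novel_isoform_id_list child_id geneStrand _ hpre
  unfold Spec_find_parent_isoform
  exact pv_main novel_isoform_id_list child_id geneStrand hpre
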